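-- pv_equiv track=rewrite | github.com/kuk329/codingTestPractice | programmers/level0/수 조작하기1.py | solution
-- ===== SOURCE A (Python) =====
-- def solution(n, control):
--
--     for s in control:
--         if s=="w":
--             n+=1
--         if s=="s":
--             n-=1
--         if s=="d":
--             n+=10
--         if s=="a":
--             n-=10
--
--     return n
-- ===== SOURCE B (Python) =====
-- def solution(n, control):
--     counts = {}
--     for ch in control:
--         counts[ch] = counts.get(ch, 0) + 1
--     return (n + counts.get("w", 0) - counts.get("s", 0)
--             + 10 * counts.get("d", 0) - 10 * counts.get("a", 0))
-- ===== Notes on version B (the rewrite author's own statement) =====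
-- stated objective: simpler
-- what changed: Replaced the per-character if-cascade loop updating n with a one-pass frequency count (Counter) followed by a closed-form arithmetic combination n + c['w'] - c['s'] + 10*c['d'] - 10*c['a'].
import Mathlib
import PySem

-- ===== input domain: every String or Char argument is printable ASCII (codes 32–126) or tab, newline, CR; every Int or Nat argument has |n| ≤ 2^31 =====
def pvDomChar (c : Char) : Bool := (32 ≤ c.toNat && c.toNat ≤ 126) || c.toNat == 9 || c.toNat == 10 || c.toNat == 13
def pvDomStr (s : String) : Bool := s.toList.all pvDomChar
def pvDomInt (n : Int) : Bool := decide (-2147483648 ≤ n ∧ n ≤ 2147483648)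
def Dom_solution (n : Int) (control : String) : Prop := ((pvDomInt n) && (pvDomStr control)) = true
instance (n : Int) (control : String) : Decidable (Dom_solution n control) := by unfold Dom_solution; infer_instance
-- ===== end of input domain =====

-- ===== PORT A =====
-- One honest line: B replaces A's per-character if-cascade updating n with a
-- one-pass character count followed by a closed-form arithmetic combination (simpler decomposition).
def solution (n : Int) (control : String) : Int :=
  control.toList.foldl
    (fun n s =>
      let n := if s = 'w' then n + 1 else n
      let n := if s = 's' then n - 1 else n
      let n := if s = 'd' then n + 10 else n
      let n := if s = 'a' then n - 10 else n
      n) n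

-- ===== PORT B =====
def solution_alt (n : Int) (control : String) : Int :=
  let counts : PySem.Dict Char Int :=
    control.toList.foldl (fun d ch => d.insert ch (d.getD ch 0 + 1)) PySem.Dict.empty
  n + counts.getD 'w' 0 - counts.getD 's' 0
    + 10 * counts.getD 'd' 0 - 10 * counts.getD 'a' 0

-- ===== PRECONDITION & SPEC =====
def Spec_solution (n : Int) (control : String) (out : Int) : Prop := out = solution_alt n control
instance (n : Int) (control : String) (out : Int) : Decidable (Spec_solution n control out) := by unfold Spec_solution; infer_instance

-- ===== CLAIM (what is proved, stated in full; the proofs are below) =====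
def Claim_equal_solution : Prop := ∀ (n : Int) (control : String), Dom_solution n control → Spec_solution n control (solution n control)

-- ===== LEMMAS AND PROOFS =====

-- The count dictionary built by B's loop answers getD with the list count.
theorem pv_counts_getD (l : List Char) (d : PySem.Dict Char Int) (c : Char) :
    (l.foldl (fun d ch => d.insert ch (d.getD ch 0 + 1)) d).getD c 0
      = d.getD c 0 + (l.count c : Int) := by
  induction l generalizing d with
  | nil => simp
  | cons x xs ih =>
    simp only [List.foldl_cons, ih, PySem.Dict.getD_insert, List.count_cons]
    by_cases h : c = x
    · subst h; simp; ring
    · simp [h, Ne.symm h]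

-- A's fold is the closed-form combination of the four counts.
theorem pv_solA (l : List Char) (n : Int) :
    l.foldl
      (fun n s =>
        let n := if s = 'w' then n + 1 else n
        let n := if s = 's' then n - 1 else n
        let n := if s = 'd' then n + 10 else n
        let n := if s = 'a' then n - 10 else n
        n) n
      = n + (l.count 'w' : Int) - (l.count 's' : Int)
          + 10 * (l.count 'd' : Int) - 10 * (l.count 'a' : Int) := by
  induction l generalizing n with
  | nil => simp
  | cons x xs ih =>
    simp only [List.foldl_cons, ih, List.count_cons]
    by_cases hw : x = 'w' <;> by_cases hs : x = 's' <;> by_cases hd : x = 'd' <;>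
      by_cases ha : x = 'a' <;> simp_all <;> ring

-- ===== VERDICT (by name: the statement is the Claim_ definition above) =====
theorem solution_spec : Claim_equal_solution := by
  intro n control _
  unfold Spec_solution solution solution_alt
  simp only [pv_solA, pv_counts_getD, PySem.Dict.getD_empty]
  ring
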